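-- pv_equiv track=rewrite | github.com/bea19962/iffy-sort | silly-sort.py | silly_sort
-- ===== SOURCE A (Python) =====
-- def largest(arr):
--     max_val = arr[0]
--     for i in range(1, len(arr)):
--         if arr[i] > max_val:
--             max_val = arr[i]
--     return max_val
--
-- def silly_sort(arr):
--     if not arr:
--         return []
--     else:
--         max_val = largest(arr)
--         sorted_array = []  # Define sorted_array inside the function
--         for i in range(1, max_val + 1):
--             if i in arr:
--                 sorted_array.append(i)
--         return sorted_array
-- ===== SOURCE B (Python) =====
-- def silly_sort(arr):
--     if not arr:
--         return []
--     return sorted({x for x in arr if x >= 1})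
-- ===== Notes on version B (the rewrite author's own statement) =====
-- stated objective: faster
-- what changed: Instead of scanning arr once per candidate i in range(1, max+1), B collects the distinct positive elements into a set in one pass and sorts them, never computing the maximum or iterating over the value range.
import Mathlib
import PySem

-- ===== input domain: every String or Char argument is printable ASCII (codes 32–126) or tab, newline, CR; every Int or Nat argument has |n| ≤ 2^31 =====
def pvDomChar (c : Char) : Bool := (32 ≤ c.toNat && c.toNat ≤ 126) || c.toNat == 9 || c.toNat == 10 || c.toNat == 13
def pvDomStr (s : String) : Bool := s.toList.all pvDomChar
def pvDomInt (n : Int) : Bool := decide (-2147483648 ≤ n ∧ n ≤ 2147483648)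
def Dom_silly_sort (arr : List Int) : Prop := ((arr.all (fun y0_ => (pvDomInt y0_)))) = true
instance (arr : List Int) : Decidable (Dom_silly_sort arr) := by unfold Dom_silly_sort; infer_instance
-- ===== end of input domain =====

-- B drops the candidate scan over range(1, max+1) entirely: it collects the distinct
-- positive elements into a set in one pass and sorts them (objective: faster).

-- ===== PORT A =====
-- helper 'largest': max_val = arr[0]; for i in 1..len-1: if arr[i] > max_val: max_val = arr[i]
def largestA (a : Int) (rest : List Int) : Int :=
  rest.foldl (fun m x => if x > m then x else m) a

def silly_sort (arr : List Int) : List Int :=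
  match arr with
  | [] => []
  | a :: rest =>
      let max_val := largestA a rest
      (PySem.List.pyRange 1 (max_val + 1) 1).foldl
        (fun acc i => if (a :: rest).contains i then acc ++ [i] else acc) []

-- ===== PORT B =====
-- sorted({x for x in arr if x >= 1})
def silly_sort_alt (arr : List Int) : List Int :=
  match arr with
  | [] => []
  | _ :: _ =>
      PySem.List.sorted (PySem.Set.ofList (arr.filter (fun x => 1 ≤ x))) (fun x => x) false

-- ===== PRECONDITION & SPEC =====
def Spec_silly_sort (arr : List Int) (out : List Int) : Prop := out = silly_sort_alt arr
instance (arr : List Int) (out : List Int) : Decidable (Spec_silly_sort arr out) := by unfold Spec_silly_sort; infer_instance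

-- ===== CLAIM (what is proved, stated in full; the proofs are below) =====
def Claim_equal_silly_sort : Prop := ∀ (arr : List Int), Dom_silly_sort arr → Spec_silly_sort arr (silly_sort arr)

-- ===== LEMMAS AND PROOFS =====

-- A's hand-rolled max loop is a fold with 'max'.
theorem largestA_eq_foldl_max (a : Int) (rest : List Int) :
    largestA a rest = rest.foldl (fun acc x => max acc x) a := by
  unfold largestA
  induction rest generalizing a with
  | nil => rfl
  | cons x t ih =>
      simp only [List.foldl_cons]
      rw [ih]
      congr 1
      by_cases h : x ≤ a
      · simp [max_eq_left h, not_lt.mpr h]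
      · simp [max_eq_right (le_of_not_ge h), lt_of_not_ge h]

theorem silly_sort_spec_aux (arr : List Int) : silly_sort arr = silly_sort_alt arr := by
  match arr with
  | [] => rfl
  | a :: rest =>
    simp only [silly_sort, silly_sort_alt, largestA_eq_foldl_max]
    set M := rest.foldl (fun acc x => max acc x) a with hM
    rw [PySem.List.foldl_append_if_eq_filter]
    rw [List.nil_append]
    -- A's result is the filter of a strictly increasing range; name it as the sorted order of B's set.
    symm
    apply PySem.List.sorted_eq_of_perm_of_pairwise_lt
    · -- permutation: both sides are nodup with the same members
      apply (List.perm_ext_iff_of_nodup ?_ (PySem.Set.nodup_ofList _)).mpr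
      · intro x
        rw [List.mem_filter, PySem.Set.mem_ofList, List.mem_filter,
            PySem.List.mem_pyRange_one]
        have hmax := PySem.List.le_foldl_max rest a
        rw [← hM] at hmax
        simp only [List.contains_eq_mem, decide_eq_true_eq, List.mem_cons]
        constructor
        · rintro ⟨⟨h1, _⟩, hmem⟩; exact ⟨hmem, h1⟩
        · rintro ⟨hmem, h1⟩
          have hxM : x ≤ M := by
            rcases hmem with h | h
            · exact h ▸ hmax.1
            · exact hmax.2 x h
          exact ⟨⟨h1, by omega⟩, hmem⟩
      · exact ((PySem.List.pairwise_lt_pyRange_one 1 (M + 1)).filter _).imp ne_of_lt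
    · exact (PySem.List.pairwise_lt_pyRange_one 1 (M + 1)).filter _

-- ===== VERDICT (by name: the statement is the Claim_ definition above) =====
theorem silly_sort_spec : Claim_equal_silly_sort := by
  intro arr _
  unfold Spec_silly_sort
  exact silly_sort_spec_aux arr
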